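-- pv_equiv track=rewrite | github.com/GregRainor/TheBard-sForge | src/nlp_interpreter.py | _match_keywords_to_scene
-- ===== SOURCE A (Python) =====
-- from typing import Optional, Dict, List, Any
--
-- def _match_keywords_to_scene(keywords: List[str], scene_keywords: Dict[str, List[str]]) -> Optional[str]:
--     scene_scores = {}
--
--     for scene, scene_words in scene_keywords.items():
--         score = 0
--         for keyword in keywords:
--             if keyword in scene_words:
--                 score += 1
--         scene_scores[scene] = score
--
--     if scene_scores and max(scene_scores.values()) > 0:
--         return max(scene_scores, key=scene_scores.get)
--
--     return None
-- ===== SOURCE B (Python) =====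
-- from typing import Optional, Dict, List
--
--
-- def _match_keywords_to_scene(keywords: List[str], scene_keywords: Dict[str, List[str]]) -> Optional[str]:
--     best_scene, best_score = None, 0
--     for scene, scene_words in scene_keywords.items():
--         score = len([k for k in keywords if k in scene_words])
--         if score > best_score:
--             best_scene, best_score = scene, score
--     return best_scene
-- ===== Notes on version B (the rewrite author's own statement) =====
-- stated objective: simpler
-- what changed: B drops the scene_scores dict and the two max() passes entirely and tracks best_scene/best_score in a single pass with a strict-greater update starting from score 0.
import Mathlib
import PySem

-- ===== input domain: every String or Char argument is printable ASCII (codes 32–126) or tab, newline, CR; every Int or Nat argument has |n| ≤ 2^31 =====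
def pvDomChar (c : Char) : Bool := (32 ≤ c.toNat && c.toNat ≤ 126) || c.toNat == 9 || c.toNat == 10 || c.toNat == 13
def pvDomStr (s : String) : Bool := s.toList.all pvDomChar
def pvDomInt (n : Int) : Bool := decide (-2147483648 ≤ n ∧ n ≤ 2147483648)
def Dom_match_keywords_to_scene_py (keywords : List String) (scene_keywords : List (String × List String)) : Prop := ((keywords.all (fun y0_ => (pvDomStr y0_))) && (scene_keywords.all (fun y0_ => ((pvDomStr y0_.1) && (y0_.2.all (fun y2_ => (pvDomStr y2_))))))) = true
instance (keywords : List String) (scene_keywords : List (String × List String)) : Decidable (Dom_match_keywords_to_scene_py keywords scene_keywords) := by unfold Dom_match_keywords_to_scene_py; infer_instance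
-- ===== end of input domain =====

-- B replaces A's scene_scores dict and its two max() passes by a single pass tracking best_scene/best_score (simpler, one pass, no dict).


-- ===== PORT A =====
def match_keywords_to_scene_py (keywords : List String) (scene_keywords : List (String × List String)) : Option String :=
  -- scene_scores = {}  ;  for scene, scene_words in scene_keywords.items(): score loop; scene_scores[scene] = score
  let scene_scores : PySem.Dict String Int :=
    scene_keywords.foldl
      (fun d p =>
        d.insert p.1
          (keywords.foldl (fun score keyword => if p.2.contains keyword then score + 1 else score) 0))
      PySem.Dict.empty
  -- if scene_scores and max(scene_scores.values()) > 0: return max(scene_scores, key=scene_scores.get)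
  if scene_scores.size ≠ 0 then
    match PySem.List.max? scene_scores.values (fun v => v) with
    | some m =>
        if m > 0 then PySem.List.max? scene_scores.keys (fun k => scene_scores.getD k 0)
        else none
    | none => none
  else none

-- ===== PORT B =====
def match_keywords_to_scene_py_alt (keywords : List String) (scene_keywords : List (String × List String)) : Option String :=
  (scene_keywords.foldl
    (fun (acc : Option String × Int) p =>
      let score : Int := (keywords.filter (fun k => p.2.contains k)).length
      if score > acc.2 then (some p.1, score) else acc)
    (none, 0)).1

-- ===== PRECONDITION & SPEC =====
-- Pre_ excludes association lists with duplicate scene names: A's argument is a Python dict, which cannot contain them.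
def Pre_match_keywords_to_scene_py (_keywords : List String) (scene_keywords : List (String × List String)) : Prop :=
  (scene_keywords.map Prod.fst).Nodup
instance (keywords : List String) (scene_keywords : List (String × List String)) : Decidable (Pre_match_keywords_to_scene_py keywords scene_keywords) := by unfold Pre_match_keywords_to_scene_py; infer_instance

def pvWitness_match_keywords_to_scene_py : List String × (List (String × List String)) :=
  (["a", "b"], [("s1", ["a"]), ("s2", ["b", "c"])])

def Spec_match_keywords_to_scene_py (keywords : List String) (scene_keywords : List (String × List String)) (out : Option String) : Prop := out = match_keywords_to_scene_py_alt keywords scene_keywords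
instance (keywords : List String) (scene_keywords : List (String × List String)) (out : Option String) : Decidable (Spec_match_keywords_to_scene_py keywords scene_keywords out) := by unfold Spec_match_keywords_to_scene_py; infer_instance

-- ===== CLAIM (what is proved, stated in full; the proofs are below) =====
def Claim_equal_match_keywords_to_scene_py : Prop := ∀ (keywords : List String) (scene_keywords : List (String × List String)), Dom_match_keywords_to_scene_py keywords scene_keywords → Pre_match_keywords_to_scene_py keywords scene_keywords → Spec_match_keywords_to_scene_py keywords scene_keywords (match_keywords_to_scene_py keywords scene_keywords)

-- ===== LEMMAS AND PROOFS =====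

-- A's per-scene score loop equals B's filter-length score.
theorem score_eq (keywords ws : List String) :
    keywords.foldl (fun score keyword => if ws.contains keyword then score + 1 else score) 0
      = ((keywords.filter (fun k => ws.contains k)).length : Int) := by
  suffices h : ∀ (l : List String) (a : Int),
      l.foldl (fun score keyword => if ws.contains keyword then score + 1 else score) a
        = a + ((l.filter (fun k => ws.contains k)).length : Int) by
    simpa using h keywords 0
  intro l
  induction l with
  | nil => intro a; simp
  | cons x t ih =>
      intro a
      rw [List.foldl_cons, List.filter_cons, ih]
      by_cases hx : ws.contains x = true
      · simp only [hx, if_true, List.length_cons]; push_cast; ring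
      · simp only [hx, if_false, Bool.false_eq_true]

-- pull a max out of a running max
theorem foldl_max_comm (l : List Int) : ∀ (a b : Int), l.foldl max (max a b) = max a (l.foldl max b) := by
  induction l with
  | nil => intro a b; simp
  | cons x t ih =>
      intro a b
      simp only [List.foldl_cons]
      rw [max_assoc, ih]

-- the foldl inside PySem.List.max?, started at `some m`, finds the FIRST element attaining the running max
theorem max?_foldl_find {α : Type} (f : α → Int) :
    ∀ (t : List α) (m : α),
      t.foldl (fun acc x => match acc with
        | none => some x
        | some m => if f m < f x then some x else some m) (some m)
      = (m :: t).find? (fun q => f q == (t.map f).foldl max (f m)) := by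
  intro t
  induction t with
  | nil => intro m; simp
  | cons x t ih =>
      intro m
      have hle : ∀ (a : Int) (l : List Int), a ≤ l.foldl max a := fun a l => (PySem.List.le_foldl_max l a).1
      rw [List.foldl_cons]
      show t.foldl _ (if f m < f x then some x else some m) = _
      by_cases hx : f m < f x
      · rw [if_pos hx]
        have hmax : max (f m) (f x) = f x := max_eq_right (le_of_lt hx)
        have hM : f m ≠ (t.map f).foldl max (f x) := by
          have := hle (f x) (t.map f); omega
        rw [List.map_cons, List.foldl_cons, hmax,
            List.find?_cons_of_neg (by simpa using hM), ih]
      · rw [if_neg hx, ih]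
        have hmax : max (f m) (f x) = f m := max_eq_left (by omega)
        rw [List.map_cons, List.foldl_cons] at *
        rw [hmax]
        by_cases hm : f m = (t.map f).foldl max (f m)
        · rw [List.find?_cons_of_pos (by simpa using hm),
              List.find?_cons_of_pos (by simpa using hm)]
        · have hxM : f x ≠ (t.map f).foldl max (f m) := by
            have := hle (f m) (t.map f); omega
          rw [List.find?_cons_of_neg (by simpa using hm),
              List.find?_cons_of_neg (by simpa using hm),
              List.find?_cons_of_neg (by simpa using hxM)]

-- B's one-pass fold, from any start, is the first element attaining the running max when it beats the start
theorem bfold {α : Type} (f : α → Int) (g : α → String) :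
    ∀ (l : List α) (b0 : Option String) (s0 : Int),
      l.foldl (fun (acc : Option String × Int) p => if f p > acc.2 then (some (g p), f p) else acc) (b0, s0)
      = (if (l.map f).foldl max s0 > s0
          then ((l.find? (fun q => f q == (l.map f).foldl max s0)).map g, (l.map f).foldl max s0)
          else (b0, s0)) := by
  intro l
  induction l with
  | nil => intro b0 s0; simp
  | cons x t ih =>
      intro b0 s0
      have hle : ∀ (a : Int) (l : List Int), a ≤ l.foldl max a := fun a l => (PySem.List.le_foldl_max l a).1
      rw [List.foldl_cons, List.map_cons, List.foldl_cons]
      show t.foldl _ (if f x > s0 then (some (g x), f x) else (b0, s0)) = _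
      by_cases hx : f x > s0
      · rw [if_pos hx]
        have hmax : max s0 (f x) = f x := max_eq_right (by omega)
        rw [hmax, ih]
        have hge : f x ≤ (t.map f).foldl max (f x) := hle (f x) (t.map f)
        by_cases hMt : (t.map f).foldl max (f x) > f x
        · rw [if_pos hMt, if_pos (by omega),
              List.find?_cons_of_neg (by simp; omega)]
        · have heq : (t.map f).foldl max (f x) = f x := by omega
          rw [if_neg hMt, if_pos (by omega),
              List.find?_cons_of_pos (by simp [heq]), heq]
          simp
      · rw [if_neg hx]
        have hmax : max s0 (f x) = s0 := max_eq_left (by omega)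
        rw [hmax, ih]
        by_cases hM : (t.map f).foldl max s0 > s0
        · rw [if_pos hM, if_pos hM,
              List.find?_cons_of_neg (by simp; omega)]
        · rw [if_neg hM, if_neg hM]

-- the keys-side max? of A equals the max? over the items, projected
theorem max?_map_fst {β : Type} (g : String → Int) (fp : String × β → Int) :
    ∀ (l : List (String × β)), (∀ p ∈ l, g p.1 = fp p) →
      PySem.List.max? (l.map Prod.fst) g = (PySem.List.max? l fp).map Prod.fst := by
  suffices h : ∀ (l : List (String × β)) (acc : Option (String × β)),
      (∀ p ∈ l, g p.1 = fp p) → (∀ q, acc = some q → g q.1 = fp q) →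
      l.foldl (fun a p => match a with
        | none => some p.1
        | some m => if g m < g p.1 then some p.1 else some m) (acc.map Prod.fst)
      = (l.foldl (fun a p => match a with
        | none => some p
        | some m => if fp m < fp p then some p else some m) acc).map Prod.fst by
    intro l hl
    simp only [PySem.List.max?]
    rw [List.foldl_map]
    have := h l none hl (fun q hq => by cases hq)
    rw [show (Option.map Prod.fst (none : Option (String × β))) = none from rfl] at this
    convert this using 2
    · funext a p
      cases a <;> rfl
    · congr 1
      funext a p
      cases a <;> rfl
  intro l
  induction l with
  | nil => intro acc _ _; rfl
  | cons x t ih =>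
      intro acc hl hacc
      rw [List.foldl_cons, List.foldl_cons]
      cases acc with
      | none =>
          exact ih (some x) (fun p hp => hl p (List.mem_cons_of_mem _ hp))
            (fun q hq => by cases hq; exact hl x List.mem_cons_self)
      | some q =>
          have hq : g q.1 = fp q := hacc q rfl
          have hx : g x.1 = fp x := hl x List.mem_cons_self
          show t.foldl _ (if g q.1 < g x.1 then some x.1 else some q.1) = _
          by_cases hlt : fp q < fp x
          · rw [if_pos (by omega)]
            have := ih (some x) (fun p hp => hl p (List.mem_cons_of_mem _ hp))
              (fun r hr => by cases hr; exact hx)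
            simpa [hlt] using this
          · rw [if_neg (by omega)]
            have := ih (some q) (fun p hp => hl p (List.mem_cons_of_mem _ hp))
              (fun r hr => by cases hr; exact hq)
            simpa [hlt] using this

-- ===== VERDICT (by name: the statement is the Claim_ definition above) =====
-- A's dict-building fold stores exactly the B-side score for each scene, in order (fresh distinct keys append).
theorem items_A (keywords : List String) (l : List (String × List String))
    (hnd : (l.map Prod.fst).Nodup) :
    (l.foldl (fun d p => d.insert p.1
        ((keywords.filter (fun k => p.2.contains k)).length : Int)) PySem.Dict.empty).items
      = l.map (fun p => (p.1, ((keywords.filter (fun k => p.2.contains k)).length : Int))) := by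
  have h := PySem.Dict.items_foldl_insert_fresh (d := PySem.Dict.empty) (l := l)
    (k := Prod.fst) (v := fun p => ((keywords.filter (fun k => p.2.contains k)).length : Int))
    (by intro a _; simp) (by simpa using hnd)
  simpa using h

-- B in closed form
theorem alt_closed (keywords : List String) (l : List (String × List String)) :
    match_keywords_to_scene_py_alt keywords l
      = (if (l.map (fun p => ((keywords.filter (fun k => p.2.contains k)).length : Int))).foldl max 0 > 0
          then ((l.find? (fun q => ((keywords.filter (fun k => q.2.contains k)).length : Int)
                    == (l.map (fun p => ((keywords.filter (fun k => p.2.contains k)).length : Int))).foldl max 0)).map Prod.fst,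
                (l.map (fun p => ((keywords.filter (fun k => p.2.contains k)).length : Int))).foldl max 0)
          else ((none : Option String), (0 : Int))).1 := by
  show (l.foldl _ ((none : Option String), (0 : Int))).1 = _
  exact congrArg Prod.fst
    (bfold (fun p => ((keywords.filter (fun k => p.2.contains k)).length : Int)) Prod.fst l none 0)

theorem match_keywords_to_scene_py_spec : Claim_equal_match_keywords_to_scene_py := by
  intro keywords l _ hpre
  show match_keywords_to_scene_py keywords l = match_keywords_to_scene_py_alt keywords l
  have hpre' : (l.map Prod.fst).Nodup := hpre
  have hstep : (fun (d : PySem.Dict String Int) (p : String × List String) =>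
      d.insert p.1 (keywords.foldl (fun score keyword => if p.2.contains keyword then score + 1 else score) 0))
      = fun d p => d.insert p.1 ((keywords.filter (fun k => p.2.contains k)).length : Int) := by
    funext d p; rw [score_eq]
  rw [alt_closed]
  unfold match_keywords_to_scene_py
  rw [hstep]
  set f : String × List String → Int := fun p => ((keywords.filter (fun k => p.2.contains k)).length : Int) with hf
  set d := l.foldl (fun d p => d.insert p.1 (f p)) PySem.Dict.empty with hd
  have hitems : d.items = l.map (fun p => (p.1, f p)) := items_A keywords l hpre'
  have hkeys : d.keys = l.map Prod.fst := by
    simp only [PySem.Dict.keys, hitems, List.map_map]; rfl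
  have hvalues : d.values = l.map f := by
    simp only [PySem.Dict.values, hitems, List.map_map]; rfl
  have hgd : ∀ q ∈ l, d.getD q.1 0 = f q := by
    intro q hq
    have hm : (q.1, f q) ∈ d.items := by rw [hitems]; exact List.mem_map_of_mem hq
    have hnd : d.keys.Nodup := by rw [hkeys]; exact hpre'
    exact PySem.Dict.getD_of_mem_items _ hm hnd 0
  cases l with
  | nil =>
      have hsz : d.size = 0 := by simp [PySem.Dict.size, hitems]
      simp [hsz]
  | cons p t =>
      have hsz : d.size ≠ 0 := by simp [PySem.Dict.size, hitems]
      rw [if_pos hsz, hvalues, List.map_cons, PySem.List.max?_id_cons]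
      have hle : f p ≤ (t.map f).foldl max (f p) := (PySem.List.le_foldl_max (t.map f) (f p)).1
      have heq : List.foldl max 0 (f p :: List.map f t)
          = max 0 ((t.map f).foldl max (f p)) := by
        rw [List.foldl_cons, show (max (0 : Int) (f p)) = max 0 (f p) from rfl, foldl_max_comm]
      rw [heq]
      show (if (t.map f).foldl max (f p) > 0
              then PySem.List.max? d.keys (fun k => d.getD k 0) else none) = _
      by_cases hM : (t.map f).foldl max (f p) > 0
      · have hmx : max 0 ((t.map f).foldl max (f p)) = (t.map f).foldl max (f p) :=
          max_eq_right (by omega)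
        rw [hmx, if_pos hM, if_pos hM]
        rw [hkeys, max?_map_fst (fun k => d.getD k 0) f (p :: t) hgd]
        have hmf : PySem.List.max? (p :: t) f
            = (p :: t).find? (fun q => f q == (t.map f).foldl max (f p)) := by
          have h := max?_foldl_find f t p
          simp only [PySem.List.max?, List.foldl_cons]
          show t.foldl _ (some p) = _
          convert h using 2
        rw [hmf]
      · have hmx : max 0 ((t.map f).foldl max (f p)) = 0 := max_eq_left (by omega)
        rw [hmx, if_neg hM, if_neg (by omega)]
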